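-- pv_equiv track=rewrite | github.com/Yarik174/pattern_interruption | src/patterns/base.py | get_alternation_length
-- ===== SOURCE A (Python) =====
-- def get_alternation_length(result_str: str) -> int:
--     """Return the length of the trailing alternation (0 if < 4).
--
--     Reproduces ``PatternEngine._get_alternation_length``.
--     """
--     if len(result_str) < 4:
--         return 0
--     alt_len = 1
--     for i in range(len(result_str) - 2, -1, -1):
--         if result_str[i] != result_str[i + 1]:
--             alt_len += 1
--         else:
--             break
--     return alt_len if alt_len >= 4 else 0
-- ===== SOURCE B (Python) =====
-- def get_alternation_length(result_str: str) -> int: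
--     """Length of the trailing alternating-character run (0 if < 4)."""
--     if len(result_str) < 4:
--         return 0
--     run = 1
--     for prev, cur in zip(result_str, result_str[1:]):
--         run = run + 1 if cur != prev else 1
--     return run if run >= 4 else 0
-- ===== Notes on version B (the rewrite author's own statement) =====
-- stated objective: alternative
-- what changed: B scans forward over adjacent pairs maintaining a run counter that resets on equal neighbours (no early exit), instead of A's backward indexed scan with a break.
import Mathlib
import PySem

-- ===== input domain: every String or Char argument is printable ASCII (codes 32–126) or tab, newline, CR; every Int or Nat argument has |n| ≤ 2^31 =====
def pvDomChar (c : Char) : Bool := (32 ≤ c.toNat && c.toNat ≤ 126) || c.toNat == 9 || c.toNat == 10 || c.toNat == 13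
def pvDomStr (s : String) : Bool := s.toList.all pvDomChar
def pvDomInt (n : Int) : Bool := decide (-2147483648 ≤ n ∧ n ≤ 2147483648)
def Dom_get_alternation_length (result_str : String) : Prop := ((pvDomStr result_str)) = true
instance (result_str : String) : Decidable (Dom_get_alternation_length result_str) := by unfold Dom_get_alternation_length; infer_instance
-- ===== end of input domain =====

-- B replaces A's backward indexed scan with early break by a forward pass over
-- adjacent pairs maintaining a resetting run counter (objective: alternative).

-- ===== PORT A =====
-- the 'for i in range(len-2, -1, -1): … else: break' loop of A
def pvALoop (cs : List Char) : List Int → Int → Int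
  | [], alt => alt
  | i :: rest, alt =>
    if PySem.List.pyGetD cs i ' ' ≠ PySem.List.pyGetD cs (i + 1) ' ' then
      pvALoop cs rest (alt + 1)
    else
      alt

def get_alternation_length (result_str : String) : Int :=
  let cs := result_str.toList
  if (cs.length : Int) < 4 then 0
  else
    let alt_len := pvALoop cs (PySem.List.pyRange ((cs.length : Int) - 2) (-1) (-1)) 1
    if alt_len ≥ 4 then alt_len else 0

-- ===== PORT B =====
def get_alternation_length_alt (result_str : String) : Int :=
  let cs := result_str.toList
  if (cs.length : Int) < 4 then 0
  else
    let run := (cs.zip (PySem.List.slice cs (some 1) none)).foldl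
      (fun run pc => if pc.2 ≠ pc.1 then run + 1 else 1) 1
    if run ≥ 4 then run else 0

-- ===== PRECONDITION & SPEC =====
def Spec_get_alternation_length (result_str : String) (out : Int) : Prop := out = get_alternation_length_alt result_str
instance (result_str : String) (out : Int) : Decidable (Spec_get_alternation_length result_str out) := by unfold Spec_get_alternation_length; infer_instance

-- ===== CLAIM (what is proved, stated in full; the proofs are below) =====
def Claim_equal_get_alternation_length : Prop := ∀ (result_str : String), Dom_get_alternation_length result_str → Spec_get_alternation_length result_str (get_alternation_length result_str)

-- ===== LEMMAS AND PROOFS =====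

-- length of the maximal alternating prefix
def pvG : List Char → Int
  | [] => 0
  | [_] => 1
  | a :: b :: t => if a ≠ b then 1 + pvG (b :: t) else 1

theorem pvALoop_shift (cs : List Char) (l : List Int) (c : Int) :
    pvALoop cs l (c + 1) = pvALoop cs l c + 1 := by
  induction l generalizing c with
  | nil => simp [pvALoop]
  | cons i rest ih =>
    simp only [pvALoop]
    split_ifs with h
    · exact ih (c + 1)
    · rfl

theorem pvALoop_prefix (ys : List Char) (a : Char) (l : List Int) (c : Int)
    (hl : ∀ i ∈ l, 0 ≤ i ∧ i + 1 < (ys.length : Int)) :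
    pvALoop (ys ++ [a]) l c = pvALoop ys l c := by
  induction l generalizing c with
  | nil => rfl
  | cons i rest ih =>
    obtain ⟨h0, h1⟩ := hl i (List.mem_cons_self)
    have h0' : (0 : Int) ≤ i + 1 := by omega
    have hi : i < (ys.length : Int) := by omega
    have hlen2 : ((ys ++ [a]).length : Int) = (ys.length : Int) + 1 := by simp
    rw [pvALoop, pvALoop,
      PySem.List.pyGetD_eq_getElem (ys ++ [a]) ' ' h0 (by omega),
      PySem.List.pyGetD_eq_getElem (ys ++ [a]) ' ' h0' (by omega),
      PySem.List.pyGetD_eq_getElem ys ' ' h0 (by omega),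
      PySem.List.pyGetD_eq_getElem ys ' ' h0' (by omega),
      List.getElem_append_left (by omega), List.getElem_append_left (by omega)]
    split_ifs with h
    · exact ih (c + 1) (fun j hj => hl j (List.mem_cons_of_mem _ hj))
    · rfl

theorem pvALoop_eq_pvG (rs : List Char) (h : rs ≠ []) :
    pvALoop rs.reverse (PySem.List.pyRange ((rs.length : Int) - 2) (-1) (-1)) 1 = pvG rs := by
  induction rs with
  | nil => exact absurd rfl h
  | cons a rest ih =>
    cases rest with
    | nil =>
      rw [PySem.List.pyRange_neg_one_eq_nil (by simp)]
      rfl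
    | cons b t =>
      have hn : ((a :: b :: t).length : Int) = (t.length : Int) + 2 := by simp; omega
      set n : Int := (t.length : Int) + 2 with hn'
      have hrev : (a :: b :: t).reverse = (b :: t).reverse ++ [a] := by simp
      have hylen' : (b :: t).reverse.length = t.length + 1 := by simp
      have hclen : ((b :: t).reverse ++ [a]).length = t.length + 2 := by simp
      have hylen : ((b :: t).reverse.length : Int) = n - 1 := by omega
      rw [hn, hrev]
      rw [PySem.List.pyRange_neg_one_cons (by omega)]
      rw [pvALoop]
      have hget1 : PySem.List.pyGetD ((b :: t).reverse ++ [a]) (n - 2) ' ' = b := by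
        rw [PySem.List.pyGetD_eq_getElem _ ' ' (by omega) (by omega)]
        rw [List.getElem_append_left (by omega)]
        rw [List.getElem_reverse]
        have hidx : (n - 2).toNat = t.length := by omega
        simp [hidx]
      have hget2 : PySem.List.pyGetD ((b :: t).reverse ++ [a]) (n - 2 + 1) ' ' = a := by
        rw [PySem.List.pyGetD_eq_getElem _ ' ' (by omega) (by omega)]
        have h0 : (n - 2 + 1).toNat = (b :: t).reverse.length := by omega
        simp [h0]
      rw [hget1, hget2]
      by_cases hab : a = b
      · simp [hab, pvG]
      · rw [if_pos (show b ≠ a from fun e => hab e.symm)]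
        rw [pvALoop_shift]
        rw [pvALoop_prefix _ _ _ _ (by
          intro i hi
          rw [PySem.List.mem_pyRange_neg_one] at hi
          constructor
          · omega
          · rw [hylen]; omega)]
        have := ih (by simp)
        rw [hylen] at *
        have harg : n - 2 - 1 = ((b :: t).length : Int) - 2 := by simp [hn']; ring
        rw [harg, this]
        simp [pvG, hab, add_comm]

theorem pvBRun_concat (u : List Char) (p q : Char) :
    (u ++ [p, q]).zip (u ++ [p, q]).tail = (u ++ [p]).zip ((u ++ [p]).tail) ++ [(p, q)] := by
  induction u with
  | nil => simp [List.zip]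
  | cons c v ih =>
    cases v with
    | nil => simp [List.zip]
    | cons d w => simpa [List.zip] using ih

theorem pvBRun_eq_pvG (ys : List Char) : ∀ (a : Char),
    ((ys ++ [a]).zip ((ys ++ [a]).tail)).foldl
      (fun run pc => if pc.2 ≠ pc.1 then run + 1 else 1) 1 = pvG (a :: ys.reverse) := by
  induction ys using List.reverseRecOn with
  | nil => intro a; simp [pvG, List.zip]
  | append_singleton xs x ih =>
    intro a
    rw [List.append_assoc]
    have hxa : ([x] ++ [a] : List Char) = [x, a] := rfl
    rw [hxa, pvBRun_concat, List.foldl_append]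
    simp only [List.foldl]
    rw [ih x]
    by_cases hax : a = x
    · simp [hax, pvG]
    · simp only [List.reverse_append, List.reverse_singleton, List.singleton_append]
      rw [pvG, if_pos (show a ≠ x from hax), if_pos (show a ≠ x from hax)]
      ring

-- ===== VERDICT (by name: the statement is the Claim_ definition above) =====
theorem get_alternation_length_spec : Claim_equal_get_alternation_length := by
  intro s _
  unfold Spec_get_alternation_length get_alternation_length get_alternation_length_alt
  simp only [PySem.List.slice_from_one]
  set cs := s.toList with hcs
  by_cases hlen : (cs.length : Int) < 4
  · simp [hlen]
  · have hne : cs ≠ [] := by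
      intro h; rw [h] at hlen; simp at hlen
    have h1 : pvALoop cs (PySem.List.pyRange ((cs.length : Int) - 2) (-1) (-1)) 1 = pvG cs.reverse := by
      have := pvALoop_eq_pvG cs.reverse (by simpa using hne)
      simpa using this
    have h2 : (cs.zip cs.tail).foldl (fun run pc => if pc.2 ≠ pc.1 then run + 1 else 1) 1 = pvG cs.reverse := by
      obtain ⟨a, zs, hz⟩ : ∃ a zs, cs.reverse = a :: zs := by
        cases hre : cs.reverse with
        | nil => exact absurd (by simpa using hre) hne
        | cons a zs => exact ⟨a, zs, rfl⟩
      have hcseq : cs = zs.reverse ++ [a] := by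
        have := congrArg List.reverse hz
        simpa using this
      rw [hcseq, pvBRun_eq_pvG]
      simp
    simp only [h1, h2]
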